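-- pv_equiv track=rewrite | github.com/khalid0424/hometask | pakeyjhomtask/t8.py | salom
-- ===== SOURCE A (Python) =====
-- def salom(num):
--     if len(num) == 1 or len(num) == 0:
--         return num
--     elif len(num) == 2 and num[0] != num[-1]:
--         return num
--     elif num[0] == num[-1]:
--         num = num[1:-1]
--         return salom(num)
--     return num[0] + salom(num[1:-1]) + num[-1]
-- ===== SOURCE B (Python) =====
-- def salom(num):
--     left = []
--     right = []
--     lo, hi = 0, len(num)
--     while hi - lo >= 2:
--         a, b = num[lo], num[hi - 1]
--         if a != b:
--             left.append(a)
--             right.append(b)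
--         lo += 1
--         hi -= 1
--     return ''.join(left) + num[lo:hi] + ''.join(reversed(right))
-- ===== Notes on version B (the rewrite author's own statement) =====
-- stated objective: faster
-- what changed: Replaced the recursion with O(n) slicing at every level by a single two-pointer loop over fixed indices that accumulates the kept left/right characters in buffers and joins once.
import Mathlib
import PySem

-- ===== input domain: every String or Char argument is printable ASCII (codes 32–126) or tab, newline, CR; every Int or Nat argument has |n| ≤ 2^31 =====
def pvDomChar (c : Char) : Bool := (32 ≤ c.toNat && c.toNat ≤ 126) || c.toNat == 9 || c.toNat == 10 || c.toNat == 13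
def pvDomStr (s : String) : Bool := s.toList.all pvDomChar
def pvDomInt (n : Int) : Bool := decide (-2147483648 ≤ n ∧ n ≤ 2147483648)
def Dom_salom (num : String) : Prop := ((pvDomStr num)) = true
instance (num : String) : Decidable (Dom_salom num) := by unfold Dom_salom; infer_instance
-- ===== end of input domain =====

-- B replaces A's recursion (which re-slices the string at every level) by a single
-- two-pointer pass with left/right buffers joined once at the end (objective: faster).

-- ===== PORT A =====
-- num[1:-1] (string slice) on the code-point list; cited by the port for termination
theorem pv_slice_mid (s : List Char) :
    PySem.List.slice s (some 1) (some (-1)) = s.tail.dropLast := by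
  simp [PySem.List.slice, PySem.List.clampIdx]
  rcases s with _ | ⟨x, xs⟩
  · simp
  · simp [List.dropLast_eq_take]

theorem pv_slice_mid_len (s : List Char) :
    (PySem.List.slice s (some 1) (some (-1))).length = s.length - 2 := by
  rw [pv_slice_mid]; simp; omega

-- recursion of A over the code points of the string; num[0] / num[-1] are guarded by
-- the length tests, so pyGetD is exact
def salomRec (s : List Char) : List Char :=
  if s.length = 1 ∨ s.length = 0 then s
  else if s.length = 2 ∧ ¬ (PySem.List.pyGetD s 0 ' ' = PySem.List.pyGetD s (-1) ' ') then s
  else if PySem.List.pyGetD s 0 ' ' = PySem.List.pyGetD s (-1) ' ' then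
    salomRec (PySem.List.slice s (some 1) (some (-1)))
  else
    PySem.List.pyGetD s 0 ' ' :: (salomRec (PySem.List.slice s (some 1) (some (-1))) ++ [PySem.List.pyGetD s (-1) ' '])
termination_by s.length
decreasing_by all_goals (rw [pv_slice_mid_len]; omega)

def salom (num : String) : String := String.mk (salomRec num.toList)

-- ===== PORT B =====
-- the while loop of Source B: lo, hi are always ≥ 0, and num[lo] / num[hi-1] are read only
-- while 2 ≤ hi - lo, i.e. in range, so Nat indices with getD are exact
def salomLoop (s : List Char) (lo hi : Nat) (left right : List Char) :
    List Char × List Char × Nat × Nat :=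
  if 2 ≤ hi - lo then
    let a := s.getD lo ' '
    let b := s.getD (hi - 1) ' '
    if a ≠ b then salomLoop s (lo + 1) (hi - 1) (left ++ [a]) (right ++ [b])
    else salomLoop s (lo + 1) (hi - 1) left right
  else (left, right, lo, hi)
termination_by hi - lo
decreasing_by all_goals omega

-- the final join of Source B: left + num[lo:hi] + reversed(right)
-- (num[lo:hi] with 0 ≤ lo ≤ hi is the clamped drop/take, exact)
def pvAssemble (s : List Char) (r : List Char × List Char × Nat × Nat) : List Char :=
  r.1 ++ (s.drop r.2.2.1).take (r.2.2.2 - r.2.2.1) ++ r.2.1.reverse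

def salom_alt (num : String) : String :=
  String.mk (pvAssemble num.toList (salomLoop num.toList 0 num.toList.length [] []))

-- ===== PRECONDITION & SPEC =====
def Spec_salom (num : String) (out : String) : Prop := out = salom_alt num
instance (num : String) (out : String) : Decidable (Spec_salom num out) := by unfold Spec_salom; infer_instance

-- ===== CLAIM (what is proved, stated in full; the proofs are below) =====
def Claim_equal_salom : Prop := ∀ (num : String), Dom_salom num → Spec_salom num (salom num)

-- ===== LEMMAS AND PROOFS =====

theorem pv_window_getD (s : List Char) (lo hi i : Nat) (h1 : lo + i < hi) (h2 : hi ≤ s.length) :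
    ((s.drop lo).take (hi - lo)).getD i ' ' = s.getD (lo + i) ' ' := by
  have h3 : i < hi - lo := by omega
  simp [List.getD_eq_getElem?_getD, List.getElem?_take_of_lt h3, List.getElem?_drop]

theorem pv_window_len (s : List Char) (lo hi : Nat) (h2 : hi ≤ s.length) :
    ((s.drop lo).take (hi - lo)).length = hi - lo := by
  simp; omega

theorem pv_window_mid (s : List Char) (lo hi : Nat) (h1 : lo + 2 ≤ hi) (h2 : hi ≤ s.length) :
    ((s.drop lo).take (hi - lo)).tail.dropLast = (s.drop (lo + 1)).take (hi - 1 - (lo + 1)) := by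
  rw [List.dropLast_eq_take, ← List.drop_one, List.drop_take, List.drop_drop, List.take_take]
  have hl : ((s.drop (lo + 1)).take (hi - lo - 1)).length = hi - lo - 1 := by simp; omega
  rw [hl]
  congr 1
  omega

theorem pv_pair (m : List Char) (h : m.length = 2) :
    m = [PySem.List.pyGetD m 0 ' ', PySem.List.pyGetD m (-1) ' '] := by
  match m, h with
  | [x, y], _ =>
    rw [show [x, y] = [x] ++ [y] from rfl, PySem.List.pyGetD_neg_one_append_singleton]
    simp [PySem.List.pyGetD_zero]

theorem pv_rec_small (m : List Char) (h : m.length ≤ 1) : salomRec m = m := by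
  rw [salomRec, if_pos (by omega)]

-- one-step characterisation of A's recursion for length ≥ 2 (the length-2 mismatch
-- branch of A coincides with the general wrap branch)
theorem pv_rec_step (m : List Char) (h : 2 ≤ m.length) :
    salomRec m =
      if PySem.List.pyGetD m 0 ' ' = PySem.List.pyGetD m (-1) ' ' then
        salomRec m.tail.dropLast
      else
        PySem.List.pyGetD m 0 ' ' :: (salomRec m.tail.dropLast ++ [PySem.List.pyGetD m (-1) ' ']) := by
  have c1 : ¬ (m.length = 1 ∨ m.length = 0) := by omega
  by_cases heq : PySem.List.pyGetD m 0 ' ' = PySem.List.pyGetD m (-1) ' '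
  · rw [if_pos heq, salomRec, pv_slice_mid, if_neg c1, if_neg (by tauto), if_pos heq]
  · rw [if_neg heq]
    by_cases h2 : m.length = 2
    · rw [salomRec, if_neg c1, if_pos ⟨h2, heq⟩]
      have hmid : m.tail.dropLast = [] := by
        match m, h2 with | [x, y], _ => simp
      rw [hmid, pv_rec_small [] (by simp)]
      conv_lhs => rw [pv_pair m h2]
      simp
    · rw [salomRec, pv_slice_mid, if_neg c1, if_neg (by tauto), if_neg heq]

-- loop invariant: assembling the loop's result equals left ++ A(window) ++ reverse right
theorem pv_loop_spec (s : List Char) (n : Nat) :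
    ∀ (lo hi : Nat) (left right : List Char), hi - lo = n → hi ≤ s.length →
      pvAssemble s (salomLoop s lo hi left right)
        = left ++ salomRec ((s.drop lo).take (hi - lo)) ++ right.reverse := by
  induction n using Nat.strong_induction_on with
  | _ n ih =>
    intro lo hi left right hn hhi
    by_cases hlt : 2 ≤ hi - lo
    · -- loop takes a step
      have hwl := pv_window_len s lo hi hhi
      set m := (s.drop lo).take (hi - lo) with hm
      have ha : PySem.List.pyGetD m 0 ' ' = s.getD lo ' ' := by
        rw [PySem.List.pyGetD_zero, hm]
        have := pv_window_getD s lo hi 0 (by omega) hhi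
        simpa using this
      have hb : PySem.List.pyGetD m (-1) ' ' = s.getD (hi - 1) ' ' := by
        have hne : m ≠ [] := by intro h; rw [h] at hwl; simp at hwl; omega
        rw [PySem.List.pyGetD_neg_one (h := hne)]
        have hgl : m.getLast hne = m.getD (m.length - 1) ' ' := by
          rw [List.getLast_eq_getElem, List.getD_eq_getElem?_getD,
              List.getElem?_eq_getElem (by omega)]
          rfl
        rw [hgl, hwl, hm, pv_window_getD s lo hi (hi - lo - 1) (by omega) hhi]
        congr 1; omega
      have hmid : m.tail.dropLast = (s.drop (lo + 1)).take (hi - 1 - (lo + 1)) := by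
        rw [hm]; exact pv_window_mid s lo hi (by omega) hhi
      have hrec := pv_rec_step m (by omega)
      rw [salomLoop]
      simp only [if_pos hlt]
      by_cases hab : s.getD lo ' ' = s.getD (hi - 1) ' '
      · simp only [hab, ne_eq, not_true_eq_false, ite_false]
        rw [ih (hi - 1 - (lo + 1)) (by omega) (lo + 1) (hi - 1) left right rfl (by omega)]
        rw [hrec, if_pos (by rw [ha, hb, hab]), hmid]
      · simp only [ne_eq, hab, not_false_eq_true, ite_true]
        rw [ih (hi - 1 - (lo + 1)) (by omega) (lo + 1) (hi - 1)
              (left ++ [s.getD lo ' ']) (right ++ [s.getD (hi - 1) ' ']) rfl (by omega)]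
        rw [hrec, if_neg (by rw [ha, hb]; exact hab), hmid, ha, hb]
        simp
    · -- loop exits; the window has length ≤ 1 and A returns it unchanged
      rw [salomLoop]
      simp only [if_neg hlt]
      rw [pv_rec_small _ (by rw [pv_window_len s lo hi hhi]; omega)]
      simp [pvAssemble]

-- ===== VERDICT (by name: the statement is the Claim_ definition above) =====
theorem salom_spec : Claim_equal_salom := by
  intro num _
  unfold Spec_salom salom salom_alt
  rw [pv_loop_spec num.toList (num.toList.length - 0) 0 num.toList.length [] [] rfl le_rfl,
      Nat.sub_zero, List.drop_zero, List.take_length]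
  simp
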